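-- pv_equiv track=rewrite | github.com/OmarArias72/Compilador_Python-PLY- | PILA_COMILLAS.py | validar_comillas
-- ===== SOURCE A (Python) =====
-- class Stack:
--     def __init__(self):
--         self.items = []
--
--     def is_empty(self):
--         return len(self.items) == 0
--
--     def push(self, item):
--         self.items.append(item)
--
--     def pop(self):
--         if not self.is_empty():
--             return self.items.pop()
--         else:
--             return None
--
--     def peek(self):
--         if not self.is_empty():
--             return self.items[-1]
--         else:
--             return None
--
-- def validar_comillas(cadena):
--     pila = Stack()
--     for caracter in cadena:
--         if caracter == '"':
--             if pila.is_empty() or pila.peek() != '"':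
--                 pila.push(caracter)
--             else:
--                 pila.pop()
--     return pila.is_empty()
-- ===== SOURCE B (Python) =====
-- def validar_comillas(cadena):
--     return cadena.count('"') % 2 == 0
-- ===== Notes on version B (the rewrite author's own statement) =====
-- stated objective: simpler
-- what changed: Replaces the Stack class and its push/pop toggling loop with a direct parity test of the double-quote count via str.count, since the stack only ever toggles between empty and a single quote.
import Mathlib
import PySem

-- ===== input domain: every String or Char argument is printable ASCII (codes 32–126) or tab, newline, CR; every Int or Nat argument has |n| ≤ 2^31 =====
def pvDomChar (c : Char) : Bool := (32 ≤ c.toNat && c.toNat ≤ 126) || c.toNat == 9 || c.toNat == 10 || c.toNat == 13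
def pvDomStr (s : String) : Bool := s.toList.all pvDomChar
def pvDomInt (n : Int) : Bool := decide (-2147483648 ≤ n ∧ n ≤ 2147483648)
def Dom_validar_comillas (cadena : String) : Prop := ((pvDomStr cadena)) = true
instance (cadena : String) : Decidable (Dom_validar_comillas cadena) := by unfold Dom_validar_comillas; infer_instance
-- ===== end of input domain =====

-- B replaces A's Stack push/pop toggling loop by a direct parity test of the double-quote count.


-- ===== PORT A =====
-- one iteration of A's loop over the stack's item list (push appends, pop removes the last item, peek reads it)
def pvStepA (items : List Char) (caracter : Char) : List Char :=
  if caracter = '"' then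
    if items.isEmpty || items.getLast? ≠ some '"' then items ++ [caracter]
    else items.dropLast
  else items

def validar_comillas (cadena : String) : Bool :=
  (cadena.toList.foldl pvStepA []).isEmpty

-- ===== PORT B =====
def validar_comillas_alt (cadena : String) : Bool :=
  PySem.Str.count cadena "\"" % 2 == 0

-- ===== PRECONDITION & SPEC =====
def Spec_validar_comillas (cadena : String) (out : Bool) : Prop := out = validar_comillas_alt cadena
instance (cadena : String) (out : Bool) : Decidable (Spec_validar_comillas cadena out) := by unfold Spec_validar_comillas; infer_instance

-- ===== CLAIM (what is proved, stated in full; the proofs are below) =====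
def Claim_equal_validar_comillas : Prop := ∀ (cadena : String), Dom_validar_comillas cadena → Spec_validar_comillas cadena (validar_comillas cadena)

-- ===== LEMMAS AND PROOFS =====

-- str.count for a single-character needle is List.count (unfolding PySem.Chars.count.go)
theorem pv_go_single (c : Char) : ∀ (l : List Char) (fuel acc : Nat), l.length ≤ fuel →
    PySem.Chars.count.go [c] fuel l acc = acc + l.count c := by
  intro l
  induction l with
  | nil => intro fuel acc h; cases fuel <;> simp [PySem.Chars.count.go]
  | cons h t ih =>
    intro fuel acc hf
    cases fuel with
    | zero => simp at hf
    | succ f =>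
      simp only [PySem.Chars.count.go]
      by_cases hc : c = h
      · subst hc
        simp only [List.isPrefixOf, beq_self_eq_true, Bool.and_eq_true, and_true]
        simp [ih f (acc + 1) (by simpa using hf)]
        omega
      · simp [List.isPrefixOf, hc, Ne.symm hc, ih f acc (by simpa using hf)]

theorem pv_count_single (s : List Char) (c : Char) : PySem.Chars.count s [c] = s.count c := by
  simp [PySem.Chars.count, pv_go_single c s s.length 0 le_rfl]

-- A's stack only toggles between [] and ['"']; its final state is determined by quote-count parity
theorem pv_foldl_stepA : ∀ (l : List Char) (s : List Char), s = [] ∨ s = ['"'] →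
    l.foldl pvStepA s = if (s.length + l.count '"') % 2 = 0 then [] else ['"'] := by
  intro l
  induction l with
  | nil =>
    intro s hs
    rcases hs with h | h <;> subst h <;> simp
  | cons h t ih =>
    intro s hs
    by_cases hc : h = '"'
    · subst hc
      rcases hs with h | h <;> subst h
      · -- empty stack: the quote is pushed
        have hstep : pvStepA [] '"' = ['"'] := by simp [pvStepA]
        rw [List.foldl_cons, hstep, ih ['"'] (Or.inr rfl)]
        have hm : (['"'].length + List.count '"' t) % 2
            = (([] : List Char).length + List.count '"' ('"' :: t)) % 2 := by
          simp [List.count_cons]; omega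
        rw [hm]
      · -- quote on top: it is popped
        have hstep : pvStepA ['"'] '"' = [] := by simp [pvStepA]
        rw [List.foldl_cons, hstep, ih [] (Or.inl rfl)]
        have hm : (([] : List Char).length + List.count '"' t) % 2
            = (['"'].length + List.count '"' ('"' :: t)) % 2 := by
          simp [List.count_cons]; omega
        rw [hm]
    · rcases hs with h | h <;> subst h <;>
        simp [pvStepA, hc, ih [] (Or.inl rfl), ih ['"'] (Or.inr rfl), List.count_cons]

-- ===== VERDICT (by name: the statement is the Claim_ definition above) =====
theorem validar_comillas_spec : Claim_equal_validar_comillas := by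
  intro cadena _
  unfold Spec_validar_comillas validar_comillas validar_comillas_alt
  rw [PySem.Str.count_eq, pv_foldl_stepA cadena.toList [] (Or.inl rfl)]
  have : ("\"" : String).toList = ['"'] := rfl
  rw [this, pv_count_single]
  split_ifs with h <;> simp_all <;> omega
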